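-- pv_equiv track=rewrite | github.com/AmruthaRajendran/Python-Programs | Greedy_Friends.py | lastfrnd
-- ===== SOURCE A (Python) =====
-- def lastfrnd(n,k,lst):
--     maximum = 0
--     for i in range(0,n):
--         if(lst[i] <= k):continue
--         r =lst[i]//k
--         if(r >= maximum):
--             maximum = r
--             ans = i+1
--     if(maximum == 0):
--         return(n)
--     else:
--         return(ans)
-- ===== SOURCE B (Python) =====
-- def lastfrnd(n, k, lst):
--     # pass 1: the maximum quotient among qualifying elements (max with a default)
--     best = max((lst[i] // k for i in range(n) if lst[i] > k), default=0)
--     if best <= 0: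
--         return n
--     # pass 2: reversed scan, early return at the last qualifying index attaining best
--     for i in range(n - 1, -1, -1):
--         if lst[i] > k and lst[i] // k == best:
--             return i + 1
-- ===== Notes on version B (the rewrite author's own statement) =====
-- stated objective: alternative
-- what changed: Replaces A's single combined max+argmax scan (running maximum with >= tie update) by two sequential passes: a builtin max over a generator to get the best quotient, then a reversed early-return scan for the last index attaining it.
import Mathlib
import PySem

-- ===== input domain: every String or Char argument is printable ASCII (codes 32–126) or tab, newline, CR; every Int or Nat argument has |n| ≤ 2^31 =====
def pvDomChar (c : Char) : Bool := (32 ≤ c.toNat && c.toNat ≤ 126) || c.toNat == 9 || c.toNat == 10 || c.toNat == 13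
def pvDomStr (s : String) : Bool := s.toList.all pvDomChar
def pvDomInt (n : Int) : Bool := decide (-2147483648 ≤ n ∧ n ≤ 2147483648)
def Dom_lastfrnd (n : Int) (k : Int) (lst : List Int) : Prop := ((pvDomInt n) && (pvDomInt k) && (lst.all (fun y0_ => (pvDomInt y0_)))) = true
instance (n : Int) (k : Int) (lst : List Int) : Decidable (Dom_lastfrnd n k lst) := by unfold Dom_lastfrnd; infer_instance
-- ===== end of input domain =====

-- B is a two-pass decomposition (max over a generator, then a reversed early-return argmax scan)
-- of A's single combined running-max scan; equal return values, no speed claim.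

-- ===== PORT A =====
def lastfrnd (n : Int) (k : Int) (lst : List Int) : Int :=
  let st := (PySem.List.pyRange 0 n 1).foldl
    (fun (st : Int × Option Int) i =>
      match PySem.List.pyGet? lst i with
      | none => st      -- IndexError: excluded by Pre_lastfrnd
      | some x =>
        if x ≤ k then st
        else
          let r := PySem.Int.floordiv x k
          if st.1 ≤ r then (r, some (i + 1)) else st)
    ((0 : Int), (none : Option Int))
  if st.1 = 0 then n
  else st.2.getD n      -- 'ans' was set whenever maximum ≠ 0, so .2 is some here

-- ===== PORT B =====
def lastfrnd_alt (n : Int) (k : Int) (lst : List Int) : Int :=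
  let qs := (PySem.List.pyRange 0 n 1).filterMap
    (fun i =>
      match PySem.List.pyGet? lst i with
      | none => none    -- IndexError: excluded by Pre_lastfrnd
      | some x => if k < x then some (PySem.Int.floordiv x k) else none)
  let best := (PySem.List.max? qs (fun q => q)).getD 0    -- max(..., default=0)
  if best ≤ 0 then n
  else
    match (PySem.List.pyRange (n - 1) (-1) (-1)).find?
      (fun i =>
        match PySem.List.pyGet? lst i with
        | none => false
        | some x => decide (k < x) && (PySem.Int.floordiv x k == best)) with
    | some i => i + 1
    | none => n         -- unreachable: best > 0 guarantees a witness

-- ===== PRECONDITION & SPEC =====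
-- Pre_ excludes exactly the inputs where A raises: n > len(lst) (IndexError), and k = 0 together with
-- a qualifying element lst[i] > k among the first n (ZeroDivisionError); k = 0 with no qualifying element never divides.
def Pre_lastfrnd (n : Int) (k : Int) (lst : List Int) : Prop :=
  (k ≠ 0 ∨ ∀ x ∈ lst.take n.toNat, x ≤ k) ∧ n ≤ (lst.length : Int)
instance (n : Int) (k : Int) (lst : List Int) : Decidable (Pre_lastfrnd n k lst) := by unfold Pre_lastfrnd; infer_instance
def pvWitness_lastfrnd : Int × Int × List Int := (3, 2, [1, 5, 7])

def Spec_lastfrnd (n : Int) (k : Int) (lst : List Int) (out : Int) : Prop := out = lastfrnd_alt n k lst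
instance (n : Int) (k : Int) (lst : List Int) (out : Int) : Decidable (Spec_lastfrnd n k lst out) := by unfold Spec_lastfrnd; infer_instance

-- ===== CLAIM (what is proved, stated in full; the proofs are below) =====
def Claim_equal_lastfrnd : Prop := ∀ (n : Int) (k : Int) (lst : List Int), Dom_lastfrnd n k lst → Pre_lastfrnd n k lst → Spec_lastfrnd n k lst (lastfrnd n k lst)

-- ===== LEMMAS AND PROOFS =====

-- the shared "qualify and divide" function of both programs
def pvF (k : Int) (lst : List Int) (i : Int) : Option Int :=
  match PySem.List.pyGet? lst i with
  | none => none
  | some x => if k < x then some (PySem.Int.floordiv x k) else none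

-- A's loop body
def pvStep (k : Int) (lst : List Int) (st : Int × Option Int) (i : Int) : Int × Option Int :=
  match PySem.List.pyGet? lst i with
  | none => st
  | some x =>
    if x ≤ k then st
    else
      let r := PySem.Int.floordiv x k
      if st.1 ≤ r then (r, some (i + 1)) else st

theorem pvStep_eq_pvF (k : Int) (lst : List Int) (st : Int × Option Int) (i : Int) :
    pvStep k lst st i =
      match pvF k lst i with
      | none => st
      | some q => if st.1 ≤ q then (q, some (i + 1)) else st := by
  unfold pvStep pvF
  cases PySem.List.pyGet? lst i with
  | none => rfl
  | some x =>
    by_cases h : k < x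
    · simp [h, not_le.mpr h]
    · simp [h, not_lt.mp h]

theorem pvFoldlMaxShift (l : List Int) : ∀ a b : Int, l.foldl max (max a b) = max a (l.foldl max b) := by
  induction l with
  | nil => intro a b; simp
  | cons h t ih =>
    intro a b
    simp only [List.foldl_cons]
    rw [max_assoc, ih]

theorem pvInv (k : Int) (lst : List Int) (L : List Int) :
    (L.foldl (pvStep k lst) ((0 : Int), (none : Option Int))).1
      = (L.filterMap (pvF k lst)).foldl max 0
    ∧ (0 < (L.filterMap (pvF k lst)).foldl max 0 →
      (L.foldl (pvStep k lst) ((0 : Int), (none : Option Int))).2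
        = (L.reverse.find? (fun i => pvF k lst i == some ((L.filterMap (pvF k lst)).foldl max 0))).map (· + 1)) := by
  induction L using List.reverseRecOn with
  | nil => exact ⟨rfl, by intro h; simp at h⟩
  | append_singleton L i ih =>
    obtain ⟨ih1, ih2⟩ := ih
    simp only [List.foldl_append, List.filterMap_append, List.reverse_append,
      List.reverse_cons, List.reverse_nil, List.nil_append, List.cons_append,
      List.foldl_cons, List.foldl_nil, List.find?_cons, List.filterMap_cons,
      List.filterMap_nil]
    rw [pvStep_eq_pvF]
    cases hf : pvF k lst i with
    | none =>
      simp only [List.foldl_nil]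
      refine ⟨ih1, ?_⟩
      intro hM
      have hfalse : ∀ x : Int, ((none : Option Int) == some x) = false := fun _ => rfl
      simp only [hfalse]
      exact ih2 hM
    | some q =>
      simp only [List.foldl_cons, List.foldl_nil]
      set M := (L.filterMap (pvF k lst)).foldl max 0 with hMdef
      rw [ih1]
      by_cases hle : M ≤ q
      · rw [if_pos hle, max_eq_right hle]
        refine ⟨rfl, ?_⟩
        intro _
        simp
      · have hlt : q < M := not_le.mp hle
        rw [if_neg hle, max_eq_left (le_of_lt hlt)]
        refine ⟨ih1, ?_⟩
        intro hM
        have hfalse : (some q == some M) = false := by simp; omega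
        simp only [hfalse]
        exact ih2 hM

-- both ports' inline lambdas are pvStep / pvF / the pvF-membership test
theorem pvA_eq (n k : Int) (lst : List Int) :
    lastfrnd n k lst =
      (let st := (PySem.List.pyRange 0 n 1).foldl (pvStep k lst) ((0 : Int), (none : Option Int))
       if st.1 = 0 then n else st.2.getD n) := rfl

theorem pvB_pred_eq (k : Int) (lst : List Int) (best : Int) :
    (fun i =>
      match PySem.List.pyGet? lst i with
      | none => false
      | some x => decide (k < x) && (PySem.Int.floordiv x k == best))
    = (fun i => pvF k lst i == some best) := by
  funext i
  unfold pvF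
  cases PySem.List.pyGet? lst i with
  | none => simp
  | some x =>
    by_cases h : k < x
    · simp [h]
    · simp [h]

theorem pvBest_max (qs : List Int) :
    qs.foldl max 0 = max 0 ((PySem.List.max? qs (fun q => q)).getD 0) := by
  cases qs with
  | nil => simp [PySem.List.max?]
  | cons h t =>
    rw [PySem.List.max?_id_cons]
    simp only [Option.getD_some, List.foldl_cons]
    exact pvFoldlMaxShift t 0 h

theorem pvDownRange (n : Int) :
    PySem.List.pyRange (n - 1) (-1) (-1) = (PySem.List.pyRange 0 n 1).reverse := by
  rw [PySem.List.pyRange_neg_one_eq_reverse]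
  norm_num

-- ===== VERDICT (by name: the statement is the Claim_ definition above) =====
theorem lastfrnd_spec : Claim_equal_lastfrnd := by
  intro n k lst _ _
  unfold Spec_lastfrnd
  rw [pvA_eq]
  unfold lastfrnd_alt
  simp only []
  rw [pvB_pred_eq, pvDownRange]
  have hqs : ((PySem.List.pyRange 0 n 1).filterMap
      (fun i =>
        match PySem.List.pyGet? lst i with
        | none => none
        | some x => if k < x then some (PySem.Int.floordiv x k) else none))
      = (PySem.List.pyRange 0 n 1).filterMap (pvF k lst) := rfl
  rw [hqs]
  obtain ⟨h1, h2⟩ := pvInv k lst (PySem.List.pyRange 0 n 1)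
  set L := PySem.List.pyRange 0 n 1 with hL
  set qs := L.filterMap (pvF k lst) with hqs'
  set best := (PySem.List.max? qs (fun q => q)).getD 0 with hbest
  have hM : qs.foldl max 0 = max 0 best := pvBest_max qs
  by_cases hb : best ≤ 0
  · have hz : (L.foldl (pvStep k lst) ((0 : Int), (none : Option Int))).1 = 0 := by
      rw [h1, hM]; omega
    simp [hz, hb]
  · have hpos : 0 < best := not_le.mp hb
    have hMb : qs.foldl max 0 = best := by rw [hM]; omega
    have hnz : (L.foldl (pvStep k lst) ((0 : Int), (none : Option Int))).1 ≠ 0 := by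
      rw [h1, hMb]; omega
    have h2' := h2 (by rw [hMb]; exact hpos)
    rw [hMb] at h2'
    simp only [if_neg hnz, if_neg hb, h2']
    cases hfind : L.reverse.find? (fun i => pvF k lst i == some best) with
    | none => simp
    | some i => simp
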